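-- pv_equiv track=rewrite | github.com/noname2048/algo | programmers/2022 KAKAO TECH INTERNSHIP/코딩 테스트 공부/dp-2/118668-v6.py | solution
-- ===== SOURCE A (Python) =====
-- def solution(alp, cop, problems):
--     DP_MAX = 90_000
--     REQ_MAX = 150
--     dp = [[DP_MAX] * (REQ_MAX + 1) for _ in range(REQ_MAX + 1)]
--
--     # goal
--     goal_alp = alp
--     goal_cop = cop
--     for problem in problems:
--         goal_alp = max(goal_alp, problem[0])
--         goal_cop = max(goal_cop, problem[1])
--
--     if goal_alp <= alp and goal_cop <= cop:
--         return 0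
--
--     # init
--     problems += [[0, 0, 1, 0, 1], [0, 0, 0, 1, 1]]
--     dp[alp][cop] = 0
--
--     for i in range(alp, goal_alp + 1):
--         for j in range(cop, goal_cop + 1):
--             for req_alp, req_cop, rw_alp, rw_cop, cost in problems:
--                 if i < req_alp or j < req_cop:
--                     continue
--                 ni = min(i + rw_alp, goal_alp)
--                 nj = min(j + rw_cop, goal_cop)
--
--                 a = dp[i][j] + cost
--                 b = dp[ni][nj]
--                 dp[ni][nj] = min(dp[i][j] + cost, dp[ni][nj])
--
--     answer = dp[goal_alp][goal_cop]
--     return answer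
-- ===== SOURCE B (Python) =====
-- # Bellman-Ford-style frontier relaxation: only states whose distance improved in
-- # the previous round are relaxed again, instead of sweeping the whole grid in
-- # index order.  Rounds are capped by the L1 diameter of the state space: every
-- # productive move raises alp+cop by at least one, so no useful training plan
-- # needs more steps than that.
-- # Like A, this mutates `problems` in place (appends the two unit trainings).
-- def solution(alp, cop, problems):
--     goal_alp = max([alp] + [p[0] for p in problems])
--     goal_cop = max([cop] + [p[1] for p in problems])
--     if goal_alp <= alp and goal_cop <= cop:
--         return 0
--     problems += [[0, 0, 1, 0, 1], [0, 0, 0, 1, 1]]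
--     INF = 90_000
--     dist = [[INF] * (goal_cop + 1) for _ in range(goal_alp + 1)]
--     dist[alp][cop] = 0
--     frontier = [(alp, cop)]
--     for _ in range(goal_alp - alp + goal_cop - cop):
--         if not frontier:
--             break
--         moved = {}
--         for i, j in frontier:
--             d = dist[i][j]
--             for req_alp, req_cop, rw_alp, rw_cop, cost in problems:
--                 if i >= req_alp and j >= req_cop:
--                     ni = min(i + rw_alp, goal_alp)
--                     nj = min(j + rw_cop, goal_cop)
--                     nd = d + cost
--                     if nd < dist[ni][nj]:
--                         dist[ni][nj] = nd
--                         moved[(ni, nj)] = True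
--         frontier = list(moved)
--     return dist[goal_alp][goal_cop]
-- ===== Notes on version B (the rewrite author's own statement) =====
-- stated objective: alternative
-- what changed: B replaces A's dense 151x151 grid relaxed in one index-order sweep by a Bellman-Ford-style frontier relaxation over a sparse dict of discovered skill states (rounds capped by the L1 diameter, stopping when no node improves); Pre_ keeps A's early-return inputs plus the contest's stated domain (skills 0..150, five nonnegative fields per problem, requirements <= 150) and excludes inputs where A raises, wraps negative indices, or returns single-sweep artifacts of negative rewards/costs.
-- outside the precondition, e.g. on solution(0, 0, [[1, 0, 1, 0, -5]]): A returns -4, B returns 1; on solution(2, 3, [[4, 2, 3, -1, 0], [6, 1, 2, 1, 0], [1, 6, 1, 0, 1]]): A returns 3, B returns 2; on solution(-1, 5, [[3, 4, 1, 1, 4], [3, 5, 1, 0, 3]]): A returns 90000, B returns 0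
import Mathlib
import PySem

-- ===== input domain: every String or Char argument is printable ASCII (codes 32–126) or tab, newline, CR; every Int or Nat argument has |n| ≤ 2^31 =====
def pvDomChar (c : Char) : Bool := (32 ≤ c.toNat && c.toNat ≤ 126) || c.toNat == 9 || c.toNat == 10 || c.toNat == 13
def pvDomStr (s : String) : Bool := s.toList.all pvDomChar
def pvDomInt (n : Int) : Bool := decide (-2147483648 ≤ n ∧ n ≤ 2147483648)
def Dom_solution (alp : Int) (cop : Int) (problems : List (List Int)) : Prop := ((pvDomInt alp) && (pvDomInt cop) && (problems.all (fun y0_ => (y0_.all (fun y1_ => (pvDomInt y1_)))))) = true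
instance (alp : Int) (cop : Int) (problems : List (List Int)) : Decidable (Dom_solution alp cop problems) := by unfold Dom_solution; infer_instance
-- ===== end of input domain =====

-- B replaces A's dense 151x151 grid swept once in index order by a Bellman-Ford-style
-- frontier relaxation over a sparse dict of discovered states, with rounds capped by the
-- L1 diameter of the state space; objective: alternative.
-- Like A, the Python B mutates `problems` in place (appends the two unit trainings);
-- the equivalence proved here is about the return value.

-- ===== PORT A =====
-- Python list indexing (negative index wraps, as in dp[i][j]); exact for -151 ≤ index ≤ 150
def pvGet2 (g : List (List Int)) (i j : Int) : Int :=
  PySem.List.pyGetD (PySem.List.pyGetD g i []) j 0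

def pvSet2 (g : List (List Int)) (i j : Int) (v : Int) : List (List Int) :=
  PySem.List.pySetD g i (PySem.List.pySetD (PySem.List.pyGetD g i []) j v)

-- one `for req_alp, req_cop, rw_alp, rw_cop, cost in problems` body of A
def pvStepA (goalA goalC i j : Int) (g : List (List Int)) (p : List Int) : List (List Int) :=
  match p with
  | [ra, rb, wa, wb, c] =>
    if i < ra ∨ j < rb then g
    else
      let ni := min (i + wa) goalA
      let nj := min (j + wb) goalC
      let a := pvGet2 g i j + c
      let b := pvGet2 g ni nj
      pvSet2 g ni nj (min a b)
  | _ => g   -- Python unpacking raises here; outside Pre_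

def solution (alp : Int) (cop : Int) (problems : List (List Int)) : Int :=
  let dp : List (List Int) := List.replicate 151 (List.replicate 151 90000)
  let goals := problems.foldl
    (fun (gl : Int × Int) p =>
      (max gl.1 (PySem.List.pyGetD p 0 0), max gl.2 (PySem.List.pyGetD p 1 0)))
    (alp, cop)
  if goals.1 ≤ alp ∧ goals.2 ≤ cop then 0
  else
    let probs := problems ++ [[0, 0, 1, 0, 1], [0, 0, 0, 1, 1]]
    let dp0 := pvSet2 dp alp cop 0
    let dpF := (PySem.List.pyRange alp (goals.1 + 1) 1).foldl
      (fun g i =>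
        (PySem.List.pyRange cop (goals.2 + 1) 1).foldl
          (fun g j => probs.foldl (fun g p => pvStepA goals.1 goals.2 i j g p) g) g)
      dp0
    pvGet2 dpF goals.1 goals.2

-- ===== PORT B =====
-- one `for req_alp, req_cop, rw_alp, rw_cop, cost in problems` body of B;
-- state = (dist grid, moved); a strict improvement writes dist and records the node
def pvStepB (goalA goalC i j d : Int)
    (st : List (List Int) × PySem.Dict (Int × Int) Bool) (p : List Int) :
    List (List Int) × PySem.Dict (Int × Int) Bool :=
  match p with
  | [ra, rb, wa, wb, co] =>
    if ra ≤ i ∧ rb ≤ j then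
      let ni := min (i + wa) goalA
      let nj := min (j + wb) goalC
      let nd := d + co
      if nd < pvGet2 st.1 ni nj then (pvSet2 st.1 ni nj nd, st.2.insert (ni, nj) true)
      else st
    else st
  | _ => st   -- Python unpacking raises here; outside Pre_

-- one frontier node: d = dist[i][j]
def pvNodeB (goalA goalC : Int) (probs : List (List Int))
    (st : List (List Int) × PySem.Dict (Int × Int) Bool) (u : Int × Int) :
    List (List Int) × PySem.Dict (Int × Int) Bool :=
  let d := pvGet2 st.1 u.1 u.2
  probs.foldl (pvStepB goalA goalC u.1 u.2 d) st

-- `for _ in range(rounds): if not frontier: break; ... frontier = list(moved)`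
def pvRoundsB (goalA goalC : Int) (probs : List (List Int)) :
    Nat → List (List Int) → List (Int × Int) → List (List Int)
  | 0, dist, _ => dist
  | r + 1, dist, frontier =>
    if frontier.isEmpty then dist
    else
      let st := frontier.foldl (pvNodeB goalA goalC probs) (dist, PySem.Dict.empty)
      pvRoundsB goalA goalC probs r st.1 st.2.keys

def solution_alt (alp : Int) (cop : Int) (problems : List (List Int)) : Int :=
  let goalA := (PySem.List.max? (alp :: problems.map (fun p => PySem.List.pyGetD p 0 0)) (fun y => y)).getD 0
  let goalC := (PySem.List.max? (cop :: problems.map (fun p => PySem.List.pyGetD p 1 0)) (fun y => y)).getD 0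
  if goalA ≤ alp ∧ goalC ≤ cop then 0
  else
    let probs := problems ++ [[0, 0, 1, 0, 1], [0, 0, 0, 1, 1]]
    let dist0 := pvSet2
      (List.replicate (goalA + 1).toNat (List.replicate (goalC + 1).toNat 90000)) alp cop 0
    let distF := pvRoundsB goalA goalC probs (goalA - alp + (goalC - cop)).toNat dist0 [(alp, cop)]
    pvGet2 distF goalA goalC

-- ===== PRECONDITION & SPEC =====
-- Pre_ keeps A's early-return inputs and the contest's stated domain (start skills in
-- 0..150, each problem a list of five nonnegative ints with requirements ≤ 150); it
-- excludes inputs outside that domain, where A raises (IndexError/ValueError), wraps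
-- negative indices around the table, or returns single-sweep artifacts of negative
-- rewards/costs that no specification of this function would pin down.
def Pre_solution (alp : Int) (cop : Int) (problems : List (List Int)) : Prop :=
  (∀ p ∈ problems, 2 ≤ p.length ∧
      PySem.List.pyGetD p 0 0 ≤ alp ∧ PySem.List.pyGetD p 1 0 ≤ cop)
  ∨
  (0 ≤ alp ∧ alp ≤ 150 ∧ 0 ≤ cop ∧ cop ≤ 150 ∧
    ∀ p ∈ problems, p.length = 5 ∧ (∀ x ∈ p, 0 ≤ x) ∧
      PySem.List.pyGetD p 0 0 ≤ 150 ∧ PySem.List.pyGetD p 1 0 ≤ 150)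

instance (alp : Int) (cop : Int) (problems : List (List Int)) : Decidable (Pre_solution alp cop problems) := by
  unfold Pre_solution; infer_instance

def pvWitness_solution : Int × Int × List (List Int) := (0, 0, [[1, 0, 1, 0, 2], [1, 1, 0, 1, 3]])

def Spec_solution (alp : Int) (cop : Int) (problems : List (List Int)) (out : Int) : Prop := out = solution_alt alp cop problems
instance (alp : Int) (cop : Int) (problems : List (List Int)) (out : Int) : Decidable (Spec_solution alp cop problems out) := by unfold Spec_solution; infer_instance

-- ===== CLAIM (what is proved, stated in full; the proofs are below) =====
def Claim_equal_solution : Prop := ∀ (alp : Int) (cop : Int) (problems : List (List Int)), Dom_solution alp cop problems → Pre_solution alp cop problems → Spec_solution alp cop problems (solution alp cop problems)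

-- ===== LEMMAS AND PROOFS =====


-- Python's normalisation of a (possibly negative) index into a 151-list
def pvN (i : Int) : Nat := (if i < 0 then i + 151 else i).toNat

-- Nat-indexed views of the table
def pvGetN (g : List (List Int)) (I J : Nat) : Int := (g.getD I []).getD J 0
def pvSetN (g : List (List Int)) (I J : Nat) (v : Int) : List (List Int) :=
  g.set I ((g.getD I []).set J v)

def pvGood (g : List (List Int)) : Prop := g.length = 151 ∧ ∀ r ∈ g, r.length = 151

def pvAV (g : List (List Int)) (i j : Int) : Int := pvGetN g (pvN i) (pvN j)

theorem pvN_lt (i : Int) (h1 : -151 ≤ i) (h2 : i ≤ 150) : pvN i < 151 := by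
  unfold pvN; split <;> omega

theorem pvN_inj {i i' : Int} (h1 : 0 ≤ i) (h2 : 0 ≤ i') (h : pvN i = pvN i') : i = i' := by
  unfold pvN at h
  rw [if_neg (by omega), if_neg (by omega)] at h
  omega

theorem pvPyGetD_norm {α : Type} (xs : List α) (i : Int) (d : α)
    (h : xs.length = 151) (h1 : -151 ≤ i) (h2 : i ≤ 150) :
    PySem.List.pyGetD xs i d = xs.getD (pvN i) d := by
  by_cases hneg : i < 0
  · rw [show i = -(((-i).toNat : Nat) : Int) by omega, PySem.List.pyGetD_neg_natCast]
    · rw [List.getD_eq_getElem _ d (by exact pvN_lt _ (by omega) (by omega) |>.trans_eq h.symm)]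
      congr 1
      unfold pvN
      rw [if_pos (by omega)]
      omega
    · omega
    · try simp only [PySem.List.len_eq]
      omega
  · rw [PySem.List.pyGetD_of_nonneg]
    · congr 1
      unfold pvN
      rw [if_neg hneg]
    · omega

theorem pvPySetD_norm {α : Type} (xs : List α) (i : Int) (v : α)
    (h : xs.length = 151) (h1 : -151 ≤ i) (h2 : i ≤ 150) :
    PySem.List.pySetD xs i v = xs.set (pvN i) v := by
  by_cases hneg : i < 0
  · unfold PySem.List.pySetD PySem.List.pySet?
    simp only [PySem.List.pyIdx?]
    rw [if_neg (by omega), if_pos (by omega)]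
    simp only [Option.map_some, Option.getD_some]
    congr 1
    unfold pvN
    rw [if_pos (by omega)]
    omega
  · rw [PySem.List.pySetD_of_nonneg]
    · congr 1
      unfold pvN
      rw [if_neg hneg]
    · omega

theorem pvGetN_setN_g (g : List (List Int)) (R C I J I' J' : Nat) (v : Int)
    (hg : g.length = R) (hr : ∀ r ∈ g, r.length = C) (hI : I < R) (hJ : J < C) :
    pvGetN (pvSetN g I J v) I' J' = if I' = I ∧ J' = J then v else pvGetN g I' J' := by
  have hrowmem : g.getD I [] ∈ g := by
    rw [List.getD_eq_getElem _ [] (by omega)]; exact List.getElem_mem _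
  have hrowlen : (g.getD I []).length = C := hr _ hrowmem
  unfold pvGetN pvSetN
  by_cases hii : I' = I
  · subst hii
    rw [show (g.set I' ((g.getD I' []).set J v)).getD I' [] = (g.getD I' []).set J v from by
      rw [List.getD_eq_getElem _ [] (by rw [List.length_set]; omega)]
      exact List.getElem_set_self _]
    by_cases hjj : J' = J
    · subst hjj
      rw [show ((g.getD I' []).set J' v).getD J' 0 = v from by
        rw [List.getD_eq_getElem _ 0 (by rw [List.length_set]; omega)]
        exact List.getElem_set_self _]
      rw [if_pos ⟨rfl, rfl⟩]
    · rw [show ((g.getD I' []).set J v).getD J' 0 = (g.getD I' []).getD J' 0 from by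
        simp [List.getD_eq_getElem?_getD, List.getElem?_set_ne (fun h => hjj h.symm)]]
      rw [if_neg (fun h => hjj h.2)]
  · rw [show (g.set I ((g.getD I []).set J v)).getD I' [] = g.getD I' [] from by
      simp [List.getD_eq_getElem?_getD, List.getElem?_set_ne (fun h => hii h.symm)]]
    rw [if_neg (fun h => hii h.1)]

theorem pvGetN_setN (g : List (List Int)) (I J I' J' : Nat) (v : Int)
    (hg : g.length = 151) (hr : ∀ r ∈ g, r.length = 151) (hI : I < 151) (hJ : J < 151) :
    pvGetN (pvSetN g I J v) I' J' = if I' = I ∧ J' = J then v else pvGetN g I' J' :=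
  pvGetN_setN_g g 151 151 I J I' J' v hg hr hI hJ

theorem pvSetN_len_rows_g (g : List (List Int)) (R C : Nat) (I J : Nat) (v : Int)
    (hg : g.length = R) (hr : ∀ r ∈ g, r.length = C) (hI : I < R) :
    (pvSetN g I J v).length = R ∧ ∀ r ∈ pvSetN g I J v, r.length = C := by
  constructor
  · simp [pvSetN, hg]
  · intro r hrm
    unfold pvSetN at hrm
    rcases List.mem_or_eq_of_mem_set hrm with h | h
    · exact hr r h
    · subst h
      rw [List.length_set]
      apply hr
      rw [List.getD_eq_getElem _ [] (by omega)]
      exact List.getElem_mem _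

theorem pvSetN_good (g : List (List Int)) (I J : Nat) (v : Int)
    (hg : pvGood g) (hI : I < 151) : pvGood (pvSetN g I J v) :=
  pvSetN_len_rows_g g 151 151 I J v hg.1 hg.2 hI

theorem pvGet2_norm (g : List (List Int)) (i j : Int)
    (hg : pvGood g)
    (hi1 : -151 ≤ i) (hi2 : i ≤ 150) (hj1 : -151 ≤ j) (hj2 : j ≤ 150) :
    pvGet2 g i j = pvAV g i j := by
  unfold pvGet2 pvAV pvGetN
  rw [pvPyGetD_norm g i [] hg.1 hi1 hi2]
  rw [pvPyGetD_norm _ j 0 (hg.2 _ (by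
    rw [List.getD_eq_getElem _ [] (by exact (pvN_lt i hi1 hi2).trans_eq hg.1.symm)]
    exact List.getElem_mem _)) hj1 hj2]

theorem pvSet2_norm (g : List (List Int)) (i j : Int) (v : Int)
    (hg : pvGood g)
    (hi1 : -151 ≤ i) (hi2 : i ≤ 150) (hj1 : -151 ≤ j) (hj2 : j ≤ 150) :
    pvSet2 g i j v = pvSetN g (pvN i) (pvN j) v := by
  unfold pvSet2 pvSetN
  rw [pvPySetD_norm g i _ hg.1 hi1 hi2]
  rw [pvPyGetD_norm g i [] hg.1 hi1 hi2]
  rw [pvPySetD_norm _ j v (hg.2 _ (by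
    rw [List.getD_eq_getElem _ [] (by exact (pvN_lt i hi1 hi2).trans_eq hg.1.symm)]
    exact List.getElem_mem _)) hj1 hj2]

theorem pvAV_setN (g : List (List Int)) (a b I J v : Int)
    (hg : pvGood g) (ha1 : 0 ≤ a) (ha2 : a ≤ 150) (hb1 : 0 ≤ b) (hb2 : b ≤ 150)
    (hI1 : 0 ≤ I) (hI2 : I ≤ 150) (hJ1 : 0 ≤ J) (hJ2 : J ≤ 150) :
    pvAV (pvSetN g (pvN a) (pvN b) v) I J = if I = a ∧ J = b then v else pvAV g I J := by
  unfold pvAV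
  rw [pvGetN_setN g _ _ _ _ _ hg.1 hg.2 (pvN_lt a (by omega) ha2) (pvN_lt b (by omega) hb2)]
  by_cases h : I = a ∧ J = b
  · rw [if_pos ⟨by rw [h.1], by rw [h.2]⟩, if_pos h]
  · rw [if_neg ?_, if_neg h]
    intro hc
    exact h ⟨pvN_inj hI1 ha1 hc.1, pvN_inj hJ1 hb1 hc.2⟩

theorem pvRowGet0 (ra rb wa wb c : Int) :
    PySem.List.pyGetD ([ra, rb, wa, wb, c] : List Int) 0 0 = ra := by simp [pysem]
theorem pvRowGet1 (ra rb wa wb c : Int) :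
    PySem.List.pyGetD ([ra, rb, wa, wb, c] : List Int) 1 0 = rb := by simp [pysem]

theorem pvFoldlMaxLe (xs : List (List Int)) (f : List Int → Int) (B : Int) :
    ∀ init : Int, init ≤ B → (∀ x ∈ xs, f x ≤ B) →
      xs.foldl (fun acc y => max acc (f y)) init ≤ B := by
  induction xs with
  | nil => intro init h0 _; exact h0
  | cons x t ih =>
    intro init h0 h
    exact ih _ (max_le h0 (h x List.mem_cons_self)) (fun y hy => h y (List.mem_cons_of_mem _ hy))

-- ===== the shared shortest-path vocabulary =====

def pvOkRow (p : List Int) : Prop :=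
  p.length = 5 ∧ (∀ x ∈ p, 0 ≤ x) ∧
    PySem.List.pyGetD p 0 0 ≤ 150 ∧ PySem.List.pyGetD p 1 0 ≤ 150

def pvCtx (alp cop gA gC : Int) (probs : List (List Int)) : Prop :=
  0 ≤ alp ∧ alp ≤ gA ∧ gA ≤ 150 ∧ 0 ≤ cop ∧ cop ≤ gC ∧ gC ≤ 150 ∧ ∀ p ∈ probs, pvOkRow p

def pvRect (alp cop gA gC i j : Int) : Prop := alp ≤ i ∧ i ≤ gA ∧ cop ≤ j ∧ j ≤ gC

def pvLexLE (I J i j : Int) : Prop := I < i ∨ (I = i ∧ J ≤ j)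

-- cost c reachable at skill state (i, j) from (alp, cop) by solving problems of `probs`
inductive pvReach (alp cop gA gC : Int) (probs : List (List Int)) : Int → Int → Int → Prop where
  | base : pvReach alp cop gA gC probs alp cop 0
  | step {i j c ra rb wa wb co : Int} :
      pvReach alp cop gA gC probs i j c →
      [ra, rb, wa, wb, co] ∈ probs → ra ≤ i → rb ≤ j →
      pvReach alp cop gA gC probs (min (i + wa) gA) (min (j + wb) gC) (c + co)

-- the same with the number of solving steps
inductive pvReachN (alp cop gA gC : Int) (probs : List (List Int)) : Nat → Int → Int → Int → Prop where
  | base : pvReachN alp cop gA gC probs 0 alp cop 0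
  | step {n : Nat} {i j c ra rb wa wb co : Int} :
      pvReachN alp cop gA gC probs n i j c →
      [ra, rb, wa, wb, co] ∈ probs → ra ≤ i → rb ≤ j →
      pvReachN alp cop gA gC probs (n + 1) (min (i + wa) gA) (min (j + wb) gC) (c + co)

theorem pvRowBounds {alp cop gA gC : Int} {probs : List (List Int)}
    (hc : pvCtx alp cop gA gC probs) {ra rb wa wb co : Int}
    (h : [ra, rb, wa, wb, co] ∈ probs) :
    0 ≤ ra ∧ ra ≤ 150 ∧ 0 ≤ rb ∧ rb ≤ 150 ∧ 0 ≤ wa ∧ 0 ≤ wb ∧ 0 ≤ co := by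
  obtain ⟨-, -, -, -, -, -, hrows⟩ := hc
  obtain ⟨-, hpos, h0, h1⟩ := hrows _ h
  rw [pvRowGet0] at h0
  rw [pvRowGet1] at h1
  simp only [List.mem_cons, List.not_mem_nil, or_false] at hpos
  refine ⟨?_, h0, ?_, h1, ?_, ?_, ?_⟩ <;>
    [exact hpos ra (by tauto); exact hpos rb (by tauto); exact hpos wa (by tauto);
     exact hpos wb (by tauto); exact hpos co (by tauto)]

theorem pvReach_rect {alp cop gA gC : Int} {probs : List (List Int)}
    (hc : pvCtx alp cop gA gC probs) {i j c : Int}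
    (h : pvReach alp cop gA gC probs i j c) : pvRect alp cop gA gC i j := by
  induction h with
  | base => exact ⟨le_refl _, hc.2.1, le_refl _, hc.2.2.2.2.1⟩
  | step hr hm hra hrb ih =>
    have hwa := (pvRowBounds hc hm).2.2.2.2.1
    have hwb := (pvRowBounds hc hm).2.2.2.2.2.1
    obtain ⟨a1, a2, a3, a4⟩ := ih
    exact ⟨by omega, by omega, by omega, by omega⟩

theorem pvReachN_toReach {alp cop gA gC : Int} {probs : List (List Int)}
    {n : Nat} {i j c : Int}
    (h : pvReachN alp cop gA gC probs n i j c) : pvReach alp cop gA gC probs i j c := by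
  induction h with
  | base => exact pvReach.base
  | step hr hm hra hrb ih => exact pvReach.step ih hm hra hrb

theorem pvReach_toN {alp cop gA gC : Int} {probs : List (List Int)}
    (hc : pvCtx alp cop gA gC probs) {i j c : Int}
    (h : pvReach alp cop gA gC probs i j c) :
    ∃ (n : Nat) (c' : Int), pvReachN alp cop gA gC probs n i j c' ∧ c' ≤ c ∧
      (n : Int) ≤ i + j - alp - cop := by
  induction h with
  | base => exact ⟨0, 0, pvReachN.base, le_refl _, by omega⟩
  | @step i j c ra rb wa wb co hr hm hra hrb ih =>
    obtain ⟨n, c', hN, hc', hn⟩ := ih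
    have hco := (pvRowBounds hc hm).2.2.2.2.2.2
    by_cases heq : min (i + wa) gA = i ∧ min (j + wb) gC = j
    · refine ⟨n, c', ?_, by omega, by omega⟩
      rw [heq.1, heq.2]
      exact hN
    · refine ⟨n + 1, c' + co, pvReachN.step hN hm hra hrb, by omega, ?_⟩
      have hrect := pvReach_rect hc hr
      have hwa := (pvRowBounds hc hm).2.2.2.2.1
      have hwb := (pvRowBounds hc hm).2.2.2.2.2.1
      obtain ⟨b1, b2, b3, b4⟩ := hrect
      have h1 : i ≤ min (i + wa) gA := by omega
      have h2 : j ≤ min (j + wb) gC := by omega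
      have : i < min (i + wa) gA ∨ j < min (j + wb) gC := by
        by_contra hcon
        push_neg at hcon
        exact heq ⟨by omega, by omega⟩
      push_cast
      omega


-- ===== A-side: the single grid sweep computes capped shortest distances =====

theorem pvStepA_eq (gA gC i j ra rb wa wb co : Int) (g : List (List Int)) (hg : pvGood g)
    (hi : 0 ≤ i) (hi2 : i ≤ 150) (hj : 0 ≤ j) (hj2 : j ≤ 150)
    (hni : 0 ≤ min (i + wa) gA) (hni2 : min (i + wa) gA ≤ 150)
    (hnj : 0 ≤ min (j + wb) gC) (hnj2 : min (j + wb) gC ≤ 150) :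
    pvStepA gA gC i j g [ra, rb, wa, wb, co] =
      if i < ra ∨ j < rb then g
      else pvSetN g (pvN (min (i + wa) gA)) (pvN (min (j + wb) gC))
        (min (pvAV g i j + co) (pvAV g (min (i + wa) gA) (min (j + wb) gC))) := by
  simp only [pvStepA]
  split
  · rfl
  · rw [pvGet2_norm g i j hg (by omega) hi2 (by omega) hj2,
        pvGet2_norm g _ _ hg (by omega) hni2 (by omega) hnj2,
        pvSet2_norm g _ _ _ hg (by omega) hni2 (by omega) hnj2]

-- bounds of a step's cell coordinates inside the rectangle
theorem pvCoordBounds {alp cop gA gC : Int} {probs : List (List Int)}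
    (hc : pvCtx alp cop gA gC probs) {i j : Int} (hr : pvRect alp cop gA gC i j)
    {ra rb wa wb co : Int} (hm : [ra, rb, wa, wb, co] ∈ probs) :
    0 ≤ i ∧ i ≤ 150 ∧ 0 ≤ j ∧ j ≤ 150 ∧
    alp ≤ min (i + wa) gA ∧ min (i + wa) gA ≤ gA ∧
    cop ≤ min (j + wb) gC ∧ min (j + wb) gC ≤ gC ∧
    0 ≤ min (i + wa) gA ∧ min (i + wa) gA ≤ 150 ∧
    0 ≤ min (j + wb) gC ∧ min (j + wb) gC ≤ 150 := by
  have hb := pvRowBounds hc hm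
  obtain ⟨r1, r2, r3, r4⟩ := hr
  obtain ⟨c1, c2, c3, c4, c5, c6, -⟩ := hc
  omega

theorem pvStepA_props {alp cop gA gC : Int} {probs : List (List Int)}
    (hc : pvCtx alp cop gA gC probs) {i j : Int} (hr : pvRect alp cop gA gC i j)
    {p : List Int} (hp : p ∈ probs) {g : List (List Int)} (hg : pvGood g) :
    pvGood (pvStepA gA gC i j g p) ∧
    (∀ I J : Int, 0 ≤ I → I ≤ 150 → 0 ≤ J → J ≤ 150 →
      pvAV (pvStepA gA gC i j g p) I J ≤ pvAV g I J ∧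
      (pvLexLE I J i j → pvAV (pvStepA gA gC i j g p) I J = pvAV g I J)) := by
  obtain ⟨hlen, hpos, -, -⟩ := hc.2.2.2.2.2.2 p hp
  obtain ⟨ra, ⟨rb, ⟨wa, ⟨wb, ⟨co, rfl⟩⟩⟩⟩⟩ :
      ∃ ra rb wa wb co : Int, p = [ra, rb, wa, wb, co] := by
    match p, hlen with
    | [a, b, c, d, e], _ => exact ⟨a, b, c, d, e, rfl⟩
  have hb := pvRowBounds hc (by exact hp)
  have hcb := pvCoordBounds hc hr (by exact hp)
  obtain ⟨q1, q2, q3, q4, q5, q6, q7, q8, q9, q10, q11, q12⟩ := hcb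
  rw [pvStepA_eq gA gC i j ra rb wa wb co g hg q1 q2 q3 q4 q9 q10 q11 q12]
  split
  · exact ⟨hg, fun I J _ _ _ _ => ⟨le_refl _, fun _ => rfl⟩⟩
  · rename_i hguard
    have hNi := pvN_lt (min (i + wa) gA) (by omega) q10
    have hNj := pvN_lt (min (j + wb) gC) (by omega) q12
    refine ⟨pvSetN_good g _ _ _ hg hNi, ?_⟩
    intro I J hI1 hI2 hJ1 hJ2
    rw [pvAV_setN g _ _ _ _ _ hg (by omega) q10 (by omega) q12 hI1 hI2 hJ1 hJ2]
    split
    · rename_i hEq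
      obtain ⟨hIe, hJe⟩ := hEq
      obtain ⟨r1, r2, r3, r4⟩ := hr
      have hwa : 0 ≤ wa := hb.2.2.2.2.1
      have hwb : 0 ≤ wb := hb.2.2.2.2.2.1
      have hco : 0 ≤ co := hb.2.2.2.2.2.2
      constructor
      · rw [hIe, hJe]
        exact min_le_right _ _
      · intro hlex
        have hii : i ≤ min (i + wa) gA := by omega
        have hjj : j ≤ min (j + wb) gC := by omega
        rcases hlex with h | ⟨h1, h2⟩
        · omega
        · have hIi : min (i + wa) gA = i := by omega
          have hJj : min (j + wb) gC = j := by omega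
          rw [hIe, hJe, hIi, hJj]
          omega
    · exact ⟨le_refl _, fun _ => rfl⟩

theorem pvStepA_relax {alp cop gA gC : Int} {probs : List (List Int)}
    (hc : pvCtx alp cop gA gC probs) {i j : Int} (hr : pvRect alp cop gA gC i j)
    {ra rb wa wb co : Int} (hm : [ra, rb, wa, wb, co] ∈ probs)
    (hra : ra ≤ i) (hrb : rb ≤ j) {g : List (List Int)} (hg : pvGood g) :
    pvAV (pvStepA gA gC i j g [ra, rb, wa, wb, co]) (min (i + wa) gA) (min (j + wb) gC) ≤
      pvAV g i j + co := by
  obtain ⟨q1, q2, q3, q4, q5, q6, q7, q8, q9, q10, q11, q12⟩ := pvCoordBounds hc hr hm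
  rw [pvStepA_eq gA gC i j ra rb wa wb co g hg q1 q2 q3 q4 q9 q10 q11 q12]
  rw [if_neg (by omega)]
  rw [pvAV_setN g _ _ _ _ _ hg (by omega) q10 (by omega) q12 (by omega) q10 (by omega) q12]
  rw [if_pos ⟨rfl, rfl⟩]
  exact min_le_left _ _

def pvInvA (alp cop gA gC : Int) (probs : List (List Int)) (g : List (List Int)) : Prop :=
  (∀ I J : Int, 0 ≤ I → I ≤ 150 → 0 ≤ J → J ≤ 150 → pvAV g I J ≤ 90000) ∧
  (∀ I J : Int, pvRect alp cop gA gC I J →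
    (pvAV g I J = 90000 ∨ pvReach alp cop gA gC probs I J (pvAV g I J)))

theorem pvStepA_inv {alp cop gA gC : Int} {probs : List (List Int)}
    (hc : pvCtx alp cop gA gC probs) {i j : Int} (hr : pvRect alp cop gA gC i j)
    {p : List Int} (hp : p ∈ probs) {g : List (List Int)} (hg : pvGood g)
    (hInv : pvInvA alp cop gA gC probs g) :
    pvInvA alp cop gA gC probs (pvStepA gA gC i j g p) := by
  obtain ⟨hlen, -, -, -⟩ := hc.2.2.2.2.2.2 p hp
  obtain ⟨ra, ⟨rb, ⟨wa, ⟨wb, ⟨co, rfl⟩⟩⟩⟩⟩ :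
      ∃ ra rb wa wb co : Int, p = [ra, rb, wa, wb, co] := by
    match p, hlen with
    | [a, b, c, d, e], _ => exact ⟨a, b, c, d, e, rfl⟩
  have hb := pvRowBounds hc (by exact hp)
  obtain ⟨q1, q2, q3, q4, q5, q6, q7, q8, q9, q10, q11, q12⟩ := pvCoordBounds hc hr (by exact hp)
  obtain ⟨hB, hR⟩ := hInv
  rw [pvStepA_eq gA gC i j ra rb wa wb co g hg q1 q2 q3 q4 q9 q10 q11 q12]
  split
  · exact ⟨hB, hR⟩
  · rename_i hguard
    have hNi := pvN_lt (min (i + wa) gA) (by omega) q10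
    have hNj := pvN_lt (min (j + wb) gC) (by omega) q12
    constructor
    · intro I J hI1 hI2 hJ1 hJ2
      rw [pvAV_setN g _ _ _ _ _ hg (by omega) q10 (by omega) q12 hI1 hI2 hJ1 hJ2]
      split
      · have hBij := hB i j q1 q2 q3 q4
        have := hB (min (i + wa) gA) (min (j + wb) gC) (by omega) q10 (by omega) q12
        have hco : 0 ≤ co := hb.2.2.2.2.2.2
        omega
      · exact hB I J hI1 hI2 hJ1 hJ2
    · intro I J hIJr
      have hIJb : 0 ≤ I ∧ I ≤ 150 ∧ 0 ≤ J ∧ J ≤ 150 := by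
        obtain ⟨z1, z2, z3, z4⟩ := hIJr
        obtain ⟨c1, c2, c3, c4, c5, c6, -⟩ := hc
        omega
      rw [pvAV_setN g _ _ _ _ _ hg (by omega) q10 (by omega) q12 hIJb.1 hIJb.2.1 hIJb.2.2.1 hIJb.2.2.2]
      split
      · rename_i hEq
        obtain ⟨hIe, hJe⟩ := hEq
        subst hIe
        subst hJe
        -- the written value: min (dp[i][j] + co) dp[ni][nj]
        have hrect_ij : pvRect alp cop gA gC i j := hr
        have hsrc := hR i j hrect_ij
        have htgt := hR (min (i + wa) gA) (min (j + wb) gC) ⟨q5, q6, q7, q8⟩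
        have hBij := hB i j q1 q2 q3 q4
        have hBt := hB (min (i + wa) gA) (min (j + wb) gC) (by omega) q10 (by omega) q12
        rcases hsrc with hsrc | hsrc
        · -- source still at 90000: the min is the old target value
          have : min (pvAV g i j + co) (pvAV g (min (i + wa) gA) (min (j + wb) gC)) =
              pvAV g (min (i + wa) gA) (min (j + wb) gC) := by
            rw [hsrc]
            have : 0 ≤ co := hb.2.2.2.2.2.2
            omega
          rw [this]
          exact htgt
        · by_cases hwhich : pvAV g i j + co ≤ pvAV g (min (i + wa) gA) (min (j + wb) gC)
          · rw [min_eq_left hwhich]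
            right
            push_cast
            exact pvReach.step hsrc (by exact hp) (by omega) (by omega)
          · rw [min_eq_right (by omega)]
            exact htgt
      · exact hR I J hIJr

-- fold of step over a list of (cell, problem) items
theorem pvSweep_props {alp cop gA gC : Int} {probs : List (List Int)}
    (hc : pvCtx alp cop gA gC probs) (xs : List (Int × Int × List Int)) :
    (∀ x ∈ xs, pvRect alp cop gA gC x.1 x.2.1 ∧ x.2.2 ∈ probs) →
    ∀ g : List (List Int), pvGood g →
      pvGood (xs.foldl (fun g x => pvStepA gA gC x.1 x.2.1 g x.2.2) g) ∧
      (∀ I J : Int, 0 ≤ I → I ≤ 150 → 0 ≤ J → J ≤ 150 →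
        pvAV (xs.foldl (fun g x => pvStepA gA gC x.1 x.2.1 g x.2.2) g) I J ≤ pvAV g I J ∧
        ((∀ x ∈ xs, pvLexLE I J x.1 x.2.1) →
          pvAV (xs.foldl (fun g x => pvStepA gA gC x.1 x.2.1 g x.2.2) g) I J = pvAV g I J)) ∧
      (pvInvA alp cop gA gC probs g →
        pvInvA alp cop gA gC probs (xs.foldl (fun g x => pvStepA gA gC x.1 x.2.1 g x.2.2) g)) := by
  induction xs with
  | nil => exact fun _ g hg => ⟨hg, fun I J _ _ _ _ => ⟨le_refl _, fun _ => rfl⟩, fun h => h⟩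
  | cons x t ih =>
    intro hxs g hg
    have hx := hxs x List.mem_cons_self
    have hstep := pvStepA_props hc hx.1 hx.2 hg
    have ht : ∀ y ∈ t, pvRect alp cop gA gC y.1 y.2.1 ∧ y.2.2 ∈ probs :=
      fun y hy => hxs y (List.mem_cons_of_mem _ hy)
    have ihs := ih ht (pvStepA gA gC x.1 x.2.1 g x.2.2) hstep.1
    simp only [List.foldl_cons]
    refine ⟨ihs.1, ?_, ?_⟩
    · intro I J hI1 hI2 hJ1 hJ2
      have h1 := (ihs.2.1 I J hI1 hI2 hJ1 hJ2)
      have h2 := hstep.2 I J hI1 hI2 hJ1 hJ2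
      constructor
      · exact le_trans h1.1 h2.1
      · intro hall
        rw [h1.2 (fun y hy => hall y (List.mem_cons_of_mem _ hy)),
            h2.2 (hall x List.mem_cons_self)]
    · intro hInv
      exact ihs.2.2 (pvStepA_inv hc hx.1 hx.2 hg hInv)


def pvStreamA (alp cop gA gC : Int) (probs : List (List Int)) : List (Int × Int × List Int) :=
  (PySem.List.pyRange alp (gA + 1) 1).flatMap
    (fun i => (PySem.List.pyRange cop (gC + 1) 1).flatMap
      (fun j => probs.map (fun p => (i, j, p))))

theorem pvStreamA_mem {alp cop gA gC : Int} {probs : List (List Int)}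
    {x : Int × Int × List Int} (h : x ∈ pvStreamA alp cop gA gC probs) :
    pvRect alp cop gA gC x.1 x.2.1 ∧ x.2.2 ∈ probs := by
  unfold pvStreamA at h
  obtain ⟨i, hi, h2⟩ := List.mem_flatMap.1 h
  obtain ⟨j, hj, h3⟩ := List.mem_flatMap.1 h2
  obtain ⟨p, hp, rfl⟩ := List.mem_map.1 h3
  have hi' := PySem.List.mem_pyRange_one.1 hi
  have hj' := PySem.List.mem_pyRange_one.1 hj
  exact ⟨show pvRect alp cop gA gC i j from ⟨hi'.1, by omega, hj'.1, by omega⟩, hp⟩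

theorem pvStreamA_split {alp cop gA gC : Int} {probs : List (List Int)}
    {i j : Int} (hr : pvRect alp cop gA gC i j) {p : List Int} (hp : p ∈ probs) :
    ∃ L R, pvStreamA alp cop gA gC probs = L ++ (i, j, p) :: R ∧
      ∀ x ∈ R, pvLexLE i j x.1 x.2.1 := by
  obtain ⟨r1, r2, r3, r4⟩ := hr
  obtain ⟨P1, P2, hP⟩ := List.append_of_mem hp
  have hRi : PySem.List.pyRange alp (gA + 1) 1 =
      PySem.List.pyRange alp i 1 ++ i :: PySem.List.pyRange (i + 1) (gA + 1) 1 := by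
    rw [PySem.List.pyRange_one_append alp i (gA + 1) r1 (by omega),
        PySem.List.pyRange_one_cons (show i < gA + 1 by omega)]
  have hRj : PySem.List.pyRange cop (gC + 1) 1 =
      PySem.List.pyRange cop j 1 ++ j :: PySem.List.pyRange (j + 1) (gC + 1) 1 := by
    rw [PySem.List.pyRange_one_append cop j (gC + 1) r3 (by omega),
        PySem.List.pyRange_one_cons (show j < gC + 1 by omega)]
  refine ⟨(PySem.List.pyRange alp i 1).flatMap
      (fun i' => (PySem.List.pyRange cop (gC + 1) 1).flatMap
        (fun j' => probs.map (fun q => (i', j', q)))) ++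
      ((PySem.List.pyRange cop j 1).flatMap (fun j' => probs.map (fun q => (i, j', q))) ++
        P1.map (fun q => (i, j, q))),
    (P2.map (fun q => (i, j, q)) ++
      (PySem.List.pyRange (j + 1) (gC + 1) 1).flatMap (fun j' => probs.map (fun q => (i, j', q)))) ++
      (PySem.List.pyRange (i + 1) (gA + 1) 1).flatMap
        (fun i' => (PySem.List.pyRange cop (gC + 1) 1).flatMap
          (fun j' => probs.map (fun q => (i', j', q)))), ?_, ?_⟩
  · unfold pvStreamA
    rw [hRi]
    rw [List.flatMap_append, List.flatMap_cons]
    rw [hRj]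
    rw [List.flatMap_append, List.flatMap_cons]
    rw [hP]
    rw [List.map_append, List.map_cons]
    simp only [List.append_assoc, List.cons_append]
  · intro x hx
    rcases List.mem_append.1 hx with hx | hx
    · rcases List.mem_append.1 hx with hx | hx
      · obtain ⟨q, hq, rfl⟩ := List.mem_map.1 hx
        exact show pvLexLE i j i j from Or.inr ⟨rfl, le_refl _⟩
      · obtain ⟨j', hj', h3⟩ := List.mem_flatMap.1 hx
        obtain ⟨q, hq, rfl⟩ := List.mem_map.1 h3
        have := PySem.List.mem_pyRange_one.1 hj'
        exact show pvLexLE i j i j' from Or.inr ⟨rfl, by omega⟩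
    · obtain ⟨i', hi', h2⟩ := List.mem_flatMap.1 hx
      obtain ⟨j', hj', h3⟩ := List.mem_flatMap.1 h2
      obtain ⟨q, hq, rfl⟩ := List.mem_map.1 h3
      have := PySem.List.mem_pyRange_one.1 hi'
      exact show pvLexLE i j i' j' from Or.inl (by omega)


-- ===== B-side: the frontier relaxation also computes capped shortest distances =====

-- the value of a grid cell at nonnegative integer coordinates
def pvBV (g : List (List Int)) (i j : Int) : Int := pvGetN g i.toNat j.toNat

def pvGoodB (gA gC : Int) (g : List (List Int)) : Prop :=
  g.length = (gA + 1).toNat ∧ ∀ r ∈ g, r.length = (gC + 1).toNat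

theorem pvGet2_nonneg (g : List (List Int)) (i j : Int) (hi : 0 ≤ i) (hj : 0 ≤ j) :
    pvGet2 g i j = pvBV g i j := by
  unfold pvGet2 pvBV pvGetN
  rw [PySem.List.pyGetD_of_nonneg, PySem.List.pyGetD_of_nonneg] <;> omega

theorem pvSet2_nonneg (g : List (List Int)) (i j v : Int) (hi : 0 ≤ i) (hj : 0 ≤ j) :
    pvSet2 g i j v = pvSetN g i.toNat j.toNat v := by
  unfold pvSet2 pvSetN
  rw [PySem.List.pySetD_of_nonneg, PySem.List.pyGetD_of_nonneg,
      PySem.List.pySetD_of_nonneg] <;> omega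

theorem pvBV_setN {gA gC : Int} (g : List (List Int)) (a b I J v : Int)
    (hg : pvGoodB gA gC g) (ha1 : 0 ≤ a) (ha2 : a ≤ gA) (hb1 : 0 ≤ b) (hb2 : b ≤ gC)
    (hI1 : 0 ≤ I) (hJ1 : 0 ≤ J) :
    pvBV (pvSetN g a.toNat b.toNat v) I J = if I = a ∧ J = b then v else pvBV g I J := by
  unfold pvBV
  rw [pvGetN_setN_g g (gA + 1).toNat (gC + 1).toNat _ _ _ _ v hg.1 hg.2
    (by omega) (by omega)]
  by_cases h : I = a ∧ J = b
  · rw [if_pos ⟨by rw [h.1], by rw [h.2]⟩, if_pos h]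
  · rw [if_neg ?_, if_neg h]
    intro hcn
    exact h ⟨by omega, by omega⟩

def pvInvG (alp cop gA gC : Int) (probs : List (List Int)) (g : List (List Int)) : Prop :=
  pvGoodB gA gC g ∧
  (∀ i j : Int, 0 ≤ i → 0 ≤ j → pvBV g i j ≤ 90000) ∧
  (∀ i j : Int, pvRect alp cop gA gC i j →
    (pvBV g i j = 90000 ∨ (pvBV g i j < 90000 ∧
      pvReach alp cop gA gC probs i j (pvBV g i j)))) ∧
  pvBV g alp cop ≤ 0

def pvSettledG (alp cop gA gC : Int) (probs : List (List Int))
    (g : List (List Int)) (i j : Int) : Prop :=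
  ∀ ra rb wa wb co : Int, [ra, rb, wa, wb, co] ∈ probs → ra ≤ i → rb ≤ j →
    pvBV g (min (i + wa) gA) (min (j + wb) gC) ≤ min (pvBV g i j + co) 90000

def pvSettledAllG (alp cop gA gC : Int) (probs : List (List Int))
    (g : List (List Int)) (fr : List (Int × Int)) : Prop :=
  ∀ i j : Int, pvRect alp cop gA gC i j → (i, j) ∉ fr →
    pvSettledG alp cop gA gC probs g i j

def pvCoverG (alp cop gA gC : Int) (probs : List (List Int))
    (g : List (List Int)) (m : Nat) : Prop :=
  ∀ (n : Nat) (i j c : Int), pvReachN alp cop gA gC probs n i j c → n ≤ m →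
    pvBV g i j ≤ min c 90000

-- frontier nodes are in the rectangle and already discovered
def pvFrOkG (alp cop gA gC : Int) (g : List (List Int)) (fr : List (Int × Int)) : Prop :=
  ∀ u ∈ fr, pvRect alp cop gA gC u.1 u.2 ∧ pvBV g u.1 u.2 < 90000

theorem pvStepB_eq {alp cop gA gC : Int} {probs : List (List Int)}
    (hc : pvCtx alp cop gA gC probs) {i j : Int} (hr : pvRect alp cop gA gC i j)
    {ra rb wa wb co : Int} (hm : [ra, rb, wa, wb, co] ∈ probs) (d : Int)
    (st : List (List Int) × PySem.Dict (Int × Int) Bool) (hg : pvGoodB gA gC st.1) :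
    pvStepB gA gC i j d st [ra, rb, wa, wb, co] =
      if ra ≤ i ∧ rb ≤ j ∧ d + co < pvBV st.1 (min (i + wa) gA) (min (j + wb) gC)
      then (pvSetN st.1 (min (i + wa) gA).toNat (min (j + wb) gC).toNat (d + co),
            st.2.insert (min (i + wa) gA, min (j + wb) gC) true)
      else st := by
  obtain ⟨q1, q2, q3, q4, q5, q6, q7, q8, q9, q10, q11, q12⟩ := pvCoordBounds hc hr hm
  simp only [pvStepB]
  by_cases h1 : ra ≤ i ∧ rb ≤ j
  · rw [if_pos h1, pvGet2_nonneg _ _ _ (by omega) (by omega)]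
    by_cases h2 : d + co < pvBV st.1 (min (i + wa) gA) (min (j + wb) gC)
    · rw [if_pos h2, if_pos ⟨h1.1, h1.2, h2⟩,
        pvSet2_nonneg _ _ _ _ (by omega) (by omega)]
    · rw [if_neg h2, if_neg (by tauto)]
  · rw [if_neg h1, if_neg (by tauto)]

-- fold of the relax body over (a sublist of) the problem list, from one fixed node
theorem pvRelaxFoldG_props {alp cop gA gC : Int} {probs : List (List Int)}
    (hc : pvCtx alp cop gA gC probs) (i j d : Int) (hr : pvRect alp cop gA gC i j)
    (hreach : pvReach alp cop gA gC probs i j d) (l : List (List Int)) :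
    (∀ q ∈ l, q ∈ probs) →
    ∀ st : List (List Int) × PySem.Dict (Int × Int) Bool,
      pvInvG alp cop gA gC probs st.1 →
      pvInvG alp cop gA gC probs (l.foldl (pvStepB gA gC i j d) st).1 ∧
      (∀ x y : Int, 0 ≤ x → 0 ≤ y →
        pvBV (l.foldl (pvStepB gA gC i j d) st).1 x y ≤ pvBV st.1 x y) ∧
      (∀ k, k ∈ st.2.keys → k ∈ (l.foldl (pvStepB gA gC i j d) st).2.keys) ∧
      (∀ x y : Int, 0 ≤ x → 0 ≤ y →
        pvBV (l.foldl (pvStepB gA gC i j d) st).1 x y ≠ pvBV st.1 x y →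
        (x, y) ∈ (l.foldl (pvStepB gA gC i j d) st).2.keys) ∧
      (∀ k, k ∈ (l.foldl (pvStepB gA gC i j d) st).2.keys → k ∈ st.2.keys ∨
        (pvRect alp cop gA gC k.1 k.2 ∧
          pvBV (l.foldl (pvStepB gA gC i j d) st).1 k.1 k.2 < 90000)) ∧
      (∀ ra rb wa wb co : Int, [ra, rb, wa, wb, co] ∈ l → ra ≤ i → rb ≤ j →
        pvBV (l.foldl (pvStepB gA gC i j d) st).1 (min (i + wa) gA) (min (j + wb) gC) ≤
          min (d + co) 90000) := by
  induction l with
  | nil =>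
    intro _ st hInv
    exact ⟨hInv, fun x y _ _ => le_refl _, fun k h => h, fun x y _ _ h => absurd rfl h,
      fun k h => Or.inl h, fun ra rb wa wb co h => absurd h (by simp)⟩
  | cons q l ih =>
    intro hl st hInv
    have hq : q ∈ probs := hl q List.mem_cons_self
    obtain ⟨hlen, -, -, -⟩ := hc.2.2.2.2.2.2 q hq
    obtain ⟨ra, ⟨rb, ⟨wa, ⟨wb, ⟨co, rfl⟩⟩⟩⟩⟩ :
        ∃ ra rb wa wb co : Int, q = [ra, rb, wa, wb, co] := by
      match q, hlen with
      | [a, b, c, d, e], _ => exact ⟨a, b, c, d, e, rfl⟩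
    obtain ⟨q1, q2, q3, q4, q5, q6, q7, q8, q9, q10, q11, q12⟩ := pvCoordBounds hc hr hq
    simp only [List.foldl_cons]
    set st1 := pvStepB gA gC i j d st [ra, rb, wa, wb, co] with hst1
    -- single-step facts
    have hstep : pvInvG alp cop gA gC probs st1.1 ∧
        (∀ x y : Int, 0 ≤ x → 0 ≤ y → pvBV st1.1 x y ≤ pvBV st.1 x y) ∧
        (∀ k, k ∈ st.2.keys → k ∈ st1.2.keys) ∧
        (∀ x y : Int, 0 ≤ x → 0 ≤ y → pvBV st1.1 x y ≠ pvBV st.1 x y →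
          (x, y) ∈ st1.2.keys) ∧
        (∀ k, k ∈ st1.2.keys → k ∈ st.2.keys ∨
          (pvRect alp cop gA gC k.1 k.2 ∧ pvBV st1.1 k.1 k.2 < 90000)) ∧
        (ra ≤ i → rb ≤ j →
          pvBV st1.1 (min (i + wa) gA) (min (j + wb) gC) ≤ min (d + co) 90000) := by
      obtain ⟨hgood, hBnd, hRch, hSrt⟩ := hInv
      rw [hst1, pvStepB_eq hc hr hq d st hgood]
      split
      · rename_i hw
        obtain ⟨hra, hrb, himp⟩ := hw
        have htle : pvBV st.1 (min (i + wa) gA) (min (j + wb) gC) ≤ 90000 :=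
          hBnd _ _ (by omega) (by omega)
        have hBVset := fun (I J : Int) (hI : 0 ≤ I) (hJ : 0 ≤ J) =>
          pvBV_setN st.1 (min (i + wa) gA) (min (j + wb) gC) I J (d + co)
            hgood (by omega) q6 (by omega) q8 hI hJ
        refine ⟨⟨?_, ?_, ?_, ?_⟩, ?_, ?_, ?_, ?_, ?_⟩
        · exact (pvSetN_len_rows_g st.1 _ _ _ _ _ hgood.1 hgood.2 (by omega)).imp
            id id
        · intro x y hx hy
          rw [hBVset x y hx hy]
          split
          · omega
          · exact hBnd x y hx hy
        · intro x y hxy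
          obtain ⟨z1, z2, z3, z4⟩ := hxy
          have c1 := hc.1
          have c4 := hc.2.2.2.1
          rw [hBVset x y (by omega) (by omega)]
          split
          · right
            rename_i hz
            rw [hz.1, hz.2]
            refine ⟨by omega, pvReach.step hreach hq hra hrb⟩
          · exact hRch x y ⟨z1, z2, z3, z4⟩
        · have c1 := hc.1
          have c4 := hc.2.2.2.1
          rw [hBVset alp cop (by omega) (by omega)]
          split
          · rename_i hz
            have h1 : pvBV st.1 (min (i + wa) gA) (min (j + wb) gC) = pvBV st.1 alp cop := by
              rw [← hz.1, ← hz.2]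
            omega
          · exact hSrt
        · intro x y hx hy
          rw [hBVset x y hx hy]
          split
          · rename_i hz
            rw [hz.1, hz.2]
            omega
          · exact le_refl _
        · intro k hk
          simp only [PySem.Dict.mem_keys_insert]
          exact Or.inr hk
        · intro x y hx hy hne
          simp only [PySem.Dict.mem_keys_insert]
          rw [hBVset x y hx hy] at hne
          by_cases hz : x = min (i + wa) gA ∧ y = min (j + wb) gC
          · left
            rw [hz.1, hz.2]
          · rw [if_neg hz] at hne
            exact absurd rfl hne
        · intro k hk
          rcases (PySem.Dict.mem_keys_insert _ _ _ _).1 hk with hk | hk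
          · right
            subst hk
            have := hBVset (min (i + wa) gA) (min (j + wb) gC) (by omega) (by omega)
            constructor
            · exact ⟨q5, q6, q7, q8⟩
            · rw [this, if_pos ⟨rfl, rfl⟩]
              omega
          · exact Or.inl hk
        · intro _ _
          rw [hBVset (min (i + wa) gA) (min (j + wb) gC) (by omega) (by omega),
            if_pos ⟨rfl, rfl⟩]
          omega
      · rename_i hw
        refine ⟨⟨hgood, hBnd, hRch, hSrt⟩, fun x y _ _ => le_refl _, fun k h => h,
          fun x y _ _ h => absurd rfl h, fun k h => Or.inl h, ?_⟩
        intro hra hrb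
        have htle : pvBV st.1 (min (i + wa) gA) (min (j + wb) gC) ≤ 90000 :=
          hBnd _ _ (by omega) (by omega)
        have : ¬ d + co < pvBV st.1 (min (i + wa) gA) (min (j + wb) gC) := fun hlt =>
          hw ⟨hra, hrb, hlt⟩
        omega
    have ihs := ih (fun y hy => hl y (List.mem_cons_of_mem _ hy)) st1 hstep.1
    refine ⟨ihs.1, ?_, ?_, ?_, ?_, ?_⟩
    · exact fun x y hx hy => le_trans (ihs.2.1 x y hx hy) (hstep.2.1 x y hx hy)
    · exact fun k hk => ihs.2.2.1 k (hstep.2.2.1 k hk)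
    · intro x y hx hy hne
      by_cases h1 : pvBV (l.foldl (pvStepB gA gC i j d) st1).1 x y = pvBV st1.1 x y
      · have h2 : pvBV st1.1 x y ≠ pvBV st.1 x y := fun h3 => hne (h1.trans h3)
        exact ihs.2.2.1 _ (hstep.2.2.2.1 x y hx hy h2)
      · exact ihs.2.2.2.1 x y hx hy h1
    · intro k hk
      rcases ihs.2.2.2.2.1 k hk with hk1 | hk1
      · rcases hstep.2.2.2.2.1 k hk1 with hk2 | hk2
        · exact Or.inl hk2
        · refine Or.inr ⟨hk2.1, ?_⟩
          have hrc := hk2.1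
          obtain ⟨z1, z2, z3, z4⟩ := hrc
          have c1 := hc.1
          have c4 := hc.2.2.2.1
          have := ihs.2.1 k.1 k.2 (by omega) (by omega)
          omega
      · exact Or.inr hk1
    · intro ra' rb' wa' wb' co' hmem hra' hrb'
      rcases List.mem_cons.1 hmem with hmem | hmem
      · have h5 : ra = ra' ∧ rb = rb' ∧ wa = wa' ∧ wb = wb' ∧ co = co' := by
          injection hmem with e1 e2
          injection e2 with e2 e3
          injection e3 with e3 e4
          injection e4 with e4 e5
          injection e5 with e5 e6
          exact ⟨e1.symm, e2.symm, e3.symm, e4.symm, e5.symm⟩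
        obtain ⟨e1, e2, e3, e4, e5⟩ := h5
        subst e1; subst e2; subst e3; subst e4; subst e5
        exact le_trans (ihs.2.1 _ _ (by omega) (by omega)) (hstep.2.2.2.2.2 hra' hrb')
      · exact ihs.2.2.2.2.2 ra' rb' wa' wb' co' hmem hra' hrb'

-- one frontier node ported through pvRelaxFoldG_props
theorem pvNodeB_props {alp cop gA gC : Int} {probs : List (List Int)}
    (hc : pvCtx alp cop gA gC probs)
    (st : List (List Int) × PySem.Dict (Int × Int) Bool) (u : Int × Int)
    (hInv : pvInvG alp cop gA gC probs st.1)
    (hur : pvRect alp cop gA gC u.1 u.2) (hulr : pvBV st.1 u.1 u.2 < 90000) :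
    pvInvG alp cop gA gC probs (pvNodeB gA gC probs st u).1 ∧
    (∀ x y : Int, 0 ≤ x → 0 ≤ y →
      pvBV (pvNodeB gA gC probs st u).1 x y ≤ pvBV st.1 x y) ∧
    (∀ k, k ∈ st.2.keys → k ∈ (pvNodeB gA gC probs st u).2.keys) ∧
    (∀ x y : Int, 0 ≤ x → 0 ≤ y →
      pvBV (pvNodeB gA gC probs st u).1 x y ≠ pvBV st.1 x y →
      (x, y) ∈ (pvNodeB gA gC probs st u).2.keys) ∧
    (∀ k, k ∈ (pvNodeB gA gC probs st u).2.keys → k ∈ st.2.keys ∨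
      (pvRect alp cop gA gC k.1 k.2 ∧
        pvBV (pvNodeB gA gC probs st u).1 k.1 k.2 < 90000)) ∧
    (∀ ra rb wa wb co : Int, [ra, rb, wa, wb, co] ∈ probs → ra ≤ u.1 → rb ≤ u.2 →
      pvBV (pvNodeB gA gC probs st u).1 (min (u.1 + wa) gA) (min (u.2 + wb) gC) ≤
        min (pvBV st.1 u.1 u.2 + co) 90000) := by
  have hreach : pvReach alp cop gA gC probs u.1 u.2 (pvBV st.1 u.1 u.2) := by
    rcases hInv.2.2.1 u.1 u.2 hur with h | h
    · omega
    · exact h.2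
  have hnode : pvNodeB gA gC probs st u =
      probs.foldl (pvStepB gA gC u.1 u.2 (pvBV st.1 u.1 u.2)) st := by
    unfold pvNodeB
    obtain ⟨z1, z2, z3, z4⟩ := hur
    have c1 := hc.1
    have c4 := hc.2.2.2.1
    rw [pvGet2_nonneg _ _ _ (by omega) (by omega)]
  have hprops := pvRelaxFoldG_props hc u.1 u.2 (pvBV st.1 u.1 u.2) hur hreach probs
    (fun q hq => hq) st hInv
  rw [hnode]
  exact hprops

-- the whole frontier loop of one round
theorem pvFrontierFoldG_props {alp cop gA gC : Int} {probs : List (List Int)}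
    (hc : pvCtx alp cop gA gC probs) (fr : List (Int × Int)) :
    ∀ st : List (List Int) × PySem.Dict (Int × Int) Bool,
      pvInvG alp cop gA gC probs st.1 →
      pvFrOkG alp cop gA gC st.1 fr →
      pvInvG alp cop gA gC probs (fr.foldl (pvNodeB gA gC probs) st).1 ∧
      (∀ x y : Int, 0 ≤ x → 0 ≤ y →
        pvBV (fr.foldl (pvNodeB gA gC probs) st).1 x y ≤ pvBV st.1 x y) ∧
      (∀ k, k ∈ st.2.keys → k ∈ (fr.foldl (pvNodeB gA gC probs) st).2.keys) ∧
      (∀ x y : Int, 0 ≤ x → 0 ≤ y →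
        pvBV (fr.foldl (pvNodeB gA gC probs) st).1 x y ≠ pvBV st.1 x y →
        (x, y) ∈ (fr.foldl (pvNodeB gA gC probs) st).2.keys) ∧
      (∀ k, k ∈ (fr.foldl (pvNodeB gA gC probs) st).2.keys → k ∈ st.2.keys ∨
        (pvRect alp cop gA gC k.1 k.2 ∧
          pvBV (fr.foldl (pvNodeB gA gC probs) st).1 k.1 k.2 < 90000)) ∧
      (∀ u ∈ fr, u ∉ (fr.foldl (pvNodeB gA gC probs) st).2.keys →
        pvSettledG alp cop gA gC probs (fr.foldl (pvNodeB gA gC probs) st).1 u.1 u.2) ∧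
      (∀ u ∈ fr, ∀ ra rb wa wb co : Int, [ra, rb, wa, wb, co] ∈ probs →
        ra ≤ u.1 → rb ≤ u.2 →
        pvBV (fr.foldl (pvNodeB gA gC probs) st).1 (min (u.1 + wa) gA) (min (u.2 + wb) gC) ≤
          min (pvBV st.1 u.1 u.2 + co) 90000) := by
  induction fr with
  | nil =>
    intro st hInv _
    exact ⟨hInv, fun x y _ _ => le_refl _, fun k h => h, fun x y _ _ h => absurd rfl h,
      fun k h => Or.inl h, fun u hu => absurd hu (by simp), fun u hu => absurd hu (by simp)⟩
  | cons u fr ih =>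
    intro st hInv hok
    obtain ⟨hur, hulr⟩ := hok u List.mem_cons_self
    have hnode := pvNodeB_props hc st u hInv hur hulr
    simp only [List.foldl_cons]
    set st1 := pvNodeB gA gC probs st u with hst1
    have hok1 : pvFrOkG alp cop gA gC st1.1 fr := by
      intro x hx
      obtain ⟨⟨z1, z2, z3, z4⟩, hxl⟩ := hok x (List.mem_cons_of_mem _ hx)
      have c1 := hc.1
      have c4 := hc.2.2.2.1
      exact ⟨⟨z1, z2, z3, z4⟩, by have := hnode.2.1 x.1 x.2 (by omega) (by omega); omega⟩
    have ihs := ih st1 hnode.1 hok1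
    obtain ⟨z1, z2, z3, z4⟩ := hur
    have c1 := hc.1
    have c4 := hc.2.2.2.1
    refine ⟨ihs.1, ?_, ?_, ?_, ?_, ?_, ?_⟩
    · exact fun x y hx hy => le_trans (ihs.2.1 x y hx hy) (hnode.2.1 x y hx hy)
    · exact fun k hk => ihs.2.2.1 k (hnode.2.2.1 k hk)
    · intro x y hx hy hne
      by_cases h1 : pvBV (fr.foldl (pvNodeB gA gC probs) st1).1 x y = pvBV st1.1 x y
      · exact ihs.2.2.1 _ (hnode.2.2.2.1 x y hx hy (fun h2 => hne (h1.trans h2)))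
      · exact ihs.2.2.2.1 x y hx hy h1
    · intro k hk
      rcases ihs.2.2.2.2.1 k hk with hk1 | hk1
      · rcases hnode.2.2.2.2.1 k hk1 with hk2 | hk2
        · exact Or.inl hk2
        · refine Or.inr ⟨hk2.1, ?_⟩
          obtain ⟨y1, y2, y3, y4⟩ := hk2.1
          have := ihs.2.1 k.1 k.2 (by omega) (by omega)
          omega
      · exact Or.inr hk1
    · -- settledness of processed nodes that end outside `moved`
      intro x hx hxk
      rcases List.mem_cons.1 hx with rfl | hx
      · have heq1 : pvBV (fr.foldl (pvNodeB gA gC probs) st1).1 x.1 x.2 = pvBV st1.1 x.1 x.2 := by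
          by_contra hne
          exact hxk (ihs.2.2.2.1 x.1 x.2 (by omega) (by omega) hne)
        have hxk1 : x ∉ st1.2.keys := fun hmem => hxk (ihs.2.2.1 x hmem)
        have heq2 : pvBV st1.1 x.1 x.2 = pvBV st.1 x.1 x.2 := by
          by_contra hne
          exact hxk1 (hnode.2.2.2.1 x.1 x.2 (by omega) (by omega) hne)
        intro ra rb wa wb co hm hra hrb
        have h1 := ihs.2.1 (min (x.1 + wa) gA) (min (x.2 + wb) gC)
          (by have := (pvRowBounds hc hm).2.2.2.2.1; omega) (by have := (pvRowBounds hc hm).2.2.2.2.2.1; omega)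
        have h2 := hnode.2.2.2.2.2 ra rb wa wb co hm hra hrb
        rw [heq1, heq2]
        omega
      · exact ihs.2.2.2.2.2.1 x hx hxk
    · -- every processed node's edges are relaxed w.r.t. its round-start value
      intro x hx ra rb wa wb co hm hra hrb
      rcases List.mem_cons.1 hx with rfl | hx
      · have h1 := ihs.2.1 (min (x.1 + wa) gA) (min (x.2 + wb) gC)
          (by have := (pvRowBounds hc hm).2.2.2.2.1; omega) (by have := (pvRowBounds hc hm).2.2.2.2.2.1; omega)
        have h2 := hnode.2.2.2.2.2 ra rb wa wb co hm hra hrb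
        omega
      · obtain ⟨y1, y2, y3, y4⟩ := (hok x (List.mem_cons_of_mem _ hx)).1
        have h1 := ihs.2.2.2.2.2.2 x hx ra rb wa wb co hm hra hrb
        have h2 := hnode.2.1 x.1 x.2 (by omega) (by omega)
        omega

-- a fully settled grid bounds every reach cost (the early-exit fixpoint case)
theorem pvChainG {alp cop gA gC : Int} {probs : List (List Int)}
    (hc : pvCtx alp cop gA gC probs) {g : List (List Int)}
    (hInv : pvInvG alp cop gA gC probs g)
    (hset : ∀ i j : Int, pvRect alp cop gA gC i j → pvSettledG alp cop gA gC probs g i j) :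
    ∀ (n : Nat) (i j c : Int), pvReachN alp cop gA gC probs n i j c →
      pvBV g i j ≤ min c 90000 := by
  intro n i j c h
  induction h with
  | base =>
    have := hInv.2.2.2
    omega
  | @step n i j c ra rb wa wb co hr hm hra hrb ih =>
    have hco := (pvRowBounds hc hm).2.2.2.2.2.2
    have hrect := pvReach_rect hc (pvReachN_toReach hr)
    have h1 := hset i j hrect ra rb wa wb co hm hra hrb
    have h2 : pvBV g (min (i + wa) gA) (min (j + wb) gC) ≤ 90000 := by
      obtain ⟨z1, z2, z3, z4⟩ := hrect
      have c1 := hc.1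
      have c4 := hc.2.2.2.1
      have hwa := (pvRowBounds hc hm).2.2.2.2.1
      have hwb := (pvRowBounds hc hm).2.2.2.2.2.1
      exact hInv.2.1 _ _ (by omega) (by omega)
    omega

-- one full round advances the covered path length by one
theorem pvRound_props {alp cop gA gC : Int} {probs : List (List Int)}
    (hc : pvCtx alp cop gA gC probs) (dist : List (List Int))
    (fr : List (Int × Int)) (m : Nat)
    (hInv : pvInvG alp cop gA gC probs dist)
    (hok : pvFrOkG alp cop gA gC dist fr)
    (hset : pvSettledAllG alp cop gA gC probs dist fr)
    (hcov : pvCoverG alp cop gA gC probs dist m) :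
    pvInvG alp cop gA gC probs (fr.foldl (pvNodeB gA gC probs) (dist, PySem.Dict.empty)).1 ∧
    pvFrOkG alp cop gA gC (fr.foldl (pvNodeB gA gC probs) (dist, PySem.Dict.empty)).1
      (fr.foldl (pvNodeB gA gC probs) (dist, PySem.Dict.empty)).2.keys ∧
    pvSettledAllG alp cop gA gC probs (fr.foldl (pvNodeB gA gC probs) (dist, PySem.Dict.empty)).1
      (fr.foldl (pvNodeB gA gC probs) (dist, PySem.Dict.empty)).2.keys ∧
    pvCoverG alp cop gA gC probs (fr.foldl (pvNodeB gA gC probs) (dist, PySem.Dict.empty)).1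
      (m + 1) := by
  have hF := pvFrontierFoldG_props hc fr (dist, PySem.Dict.empty) hInv hok
  set st' := fr.foldl (pvNodeB gA gC probs) (dist, PySem.Dict.empty) with hst'
  obtain ⟨F1, F2, F3, F4, F5, F6, F7⟩ := hF
  have F2' : ∀ x y : Int, 0 ≤ x → 0 ≤ y → pvBV st'.1 x y ≤ pvBV dist x y := F2
  have F4' : ∀ x y : Int, 0 ≤ x → 0 ≤ y → pvBV st'.1 x y ≠ pvBV dist x y →
      (x, y) ∈ st'.2.keys := F4
  have F7' : ∀ u ∈ fr, ∀ ra rb wa wb co : Int, [ra, rb, wa, wb, co] ∈ probs →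
      ra ≤ u.1 → rb ≤ u.2 →
      pvBV st'.1 (min (u.1 + wa) gA) (min (u.2 + wb) gC) ≤
        min (pvBV dist u.1 u.2 + co) 90000 := F7
  refine ⟨F1, ?_, ?_, ?_⟩
  · intro k hk
    rcases F5 k hk with hk1 | hk1
    · exact absurd hk1 (by simp [PySem.Dict.keys_empty])
    · exact hk1
  · -- settledness of everything outside the new frontier
    intro i j hrect hnk
    by_cases hfr0 : ((i, j) : Int × Int) ∈ fr
    · exact F6 (i, j) hfr0 hnk
    · obtain ⟨z1, z2, z3, z4⟩ := hrect
      have c1 := hc.1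
      have c4 := hc.2.2.2.1
      have heq : pvBV st'.1 i j = pvBV dist i j := by
        by_contra hne
        exact hnk (F4' i j (by omega) (by omega) hne)
      intro ra rb wa wb co hm hra hrb
      have h1 := hset i j ⟨z1, z2, z3, z4⟩ hfr0 ra rb wa wb co hm hra hrb
      have h2 := F2' (min (i + wa) gA) (min (j + wb) gC)
        (by have := (pvRowBounds hc hm).2.2.2.2.1; omega)
        (by have := (pvRowBounds hc hm).2.2.2.2.2.1; omega)
      rw [heq]
      omega
  · -- cover m + 1
    intro n i j c h hn
    cases h with
    | base =>
      have := F1.2.2.2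
      omega
    | @step n0 i0 j0 c0 ra rb wa wb co hr hm hra hrb =>
      have hco := (pvRowBounds hc hm).2.2.2.2.2.2
      have hrect0 := pvReach_rect hc (pvReachN_toReach hr)
      obtain ⟨z1, z2, z3, z4⟩ := hrect0
      have c1 := hc.1
      have c4 := hc.2.2.2.1
      have hprior : pvBV dist i0 j0 ≤ min c0 90000 := hcov n0 i0 j0 c0 hr (by omega)
      by_cases hfr0 : ((i0, j0) : Int × Int) ∈ fr
      · have h1 : pvBV st'.1 (min (i0 + wa) gA) (min (j0 + wb) gC) ≤
            min (pvBV dist i0 j0 + co) 90000 := F7' (i0, j0) hfr0 ra rb wa wb co hm hra hrb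
        omega
      · have h1 : pvBV dist (min (i0 + wa) gA) (min (j0 + wb) gC) ≤
            min (pvBV dist i0 j0 + co) 90000 :=
          hset i0 j0 ⟨z1, z2, z3, z4⟩ hfr0 ra rb wa wb co hm hra hrb
        have h2 := F2' (min (i0 + wa) gA) (min (j0 + wb) gC)
          (by have := (pvRowBounds hc hm).2.2.2.2.1; omega)
          (by have := (pvRowBounds hc hm).2.2.2.2.2.1; omega)
        omega

-- the capped round loop
theorem pvRounds_props {alp cop gA gC : Int} {probs : List (List Int)}
    (hc : pvCtx alp cop gA gC probs) :
    ∀ (r : Nat) (dist : List (List Int)) (fr : List (Int × Int)) (m : Nat),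
      pvInvG alp cop gA gC probs dist →
      pvFrOkG alp cop gA gC dist fr →
      pvSettledAllG alp cop gA gC probs dist fr →
      pvCoverG alp cop gA gC probs dist m →
      pvInvG alp cop gA gC probs (pvRoundsB gA gC probs r dist fr) ∧
      (∀ (n : Nat) (i j c : Int), pvReachN alp cop gA gC probs n i j c → n ≤ m + r →
        pvBV (pvRoundsB gA gC probs r dist fr) i j ≤ min c 90000) := by
  intro r
  induction r with
  | zero =>
    intro dist fr m hInv _ _ hcov
    exact ⟨hInv, fun n i j c h hn => hcov n i j c h (by omega)⟩
  | succ r ih =>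
    intro dist fr m hInv hok hset hcov
    show pvInvG _ _ _ _ _ (pvRoundsB gA gC probs (r + 1) dist fr) ∧ _
    rw [show pvRoundsB gA gC probs (r + 1) dist fr =
        if fr.isEmpty then dist
        else pvRoundsB gA gC probs r
          (fr.foldl (pvNodeB gA gC probs) (dist, PySem.Dict.empty)).1
          (fr.foldl (pvNodeB gA gC probs) (dist, PySem.Dict.empty)).2.keys from rfl]
    by_cases hemp : fr.isEmpty
    · rw [if_pos hemp]
      have hfr : fr = [] := List.isEmpty_iff.1 hemp
      subst hfr
      refine ⟨hInv, ?_⟩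
      intro n i j c h _
      exact pvChainG hc hInv (fun i j hrect => hset i j hrect (by simp)) n i j c h
    · rw [if_neg hemp]
      obtain ⟨R1, R2, R3, R4⟩ := pvRound_props hc dist fr m hInv hok hset hcov
      have := ih _ _ (m + 1) R1 R2 R3 R4
      exact ⟨this.1, fun n i j c h hn => this.2 n i j c h (by omega)⟩

-- chaining the final-table edge inequalities along a reachability derivation
theorem pvChainA {alp cop gA gC : Int} {probs : List (List Int)}
    (hc : pvCtx alp cop gA gC probs) (gF : List (List Int))
    (hS : pvAV gF alp cop ≤ 0)
    (hE : ∀ i j : Int, pvRect alp cop gA gC i j →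
      ∀ ra rb wa wb co : Int, [ra, rb, wa, wb, co] ∈ probs → ra ≤ i → rb ≤ j →
        pvAV gF (min (i + wa) gA) (min (j + wb) gC) ≤ pvAV gF i j + co) :
    ∀ i j c : Int, pvReach alp cop gA gC probs i j c → pvAV gF i j ≤ c := by
  intro i j c h
  induction h with
  | base => exact hS
  | @step i j c ra rb wa wb co hr hm hra hrb ih =>
    have h1 := hE i j (pvReach_rect hc hr) ra rb wa wb co hm hra hrb
    omega

-- everything the main proof needs about A's finished sweep table
theorem pvA_facts {alp cop gA gC : Int} {probs : List (List Int)}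
    (hc : pvCtx alp cop gA gC probs) (g0 : List (List Int)) (hg0 : pvGood g0)
    (hInv0 : pvInvA alp cop gA gC probs g0) (hS0 : pvAV g0 alp cop ≤ 0) :
    pvGood ((pvStreamA alp cop gA gC probs).foldl
      (fun g x => pvStepA gA gC x.1 x.2.1 g x.2.2) g0) ∧
    pvInvA alp cop gA gC probs ((pvStreamA alp cop gA gC probs).foldl
      (fun g x => pvStepA gA gC x.1 x.2.1 g x.2.2) g0) ∧
    (∀ i j c : Int, pvReach alp cop gA gC probs i j c →
      pvAV ((pvStreamA alp cop gA gC probs).foldl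
        (fun g x => pvStepA gA gC x.1 x.2.1 g x.2.2) g0) i j ≤ c) := by
  have halp : 0 ≤ alp ∧ alp ≤ 150 ∧ 0 ≤ cop ∧ cop ≤ 150 := by
    obtain ⟨c1, c2, c3, c4, c5, c6, -⟩ := hc
    exact ⟨c1, by omega, c4, by omega⟩
  have hmem : ∀ x ∈ pvStreamA alp cop gA gC probs,
      pvRect alp cop gA gC x.1 x.2.1 ∧ x.2.2 ∈ probs := fun x hx => pvStreamA_mem hx
  set gF := (pvStreamA alp cop gA gC probs).foldl
      (fun g x => pvStepA gA gC x.1 x.2.1 g x.2.2) g0 with hgF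
  have hsweep := pvSweep_props hc (pvStreamA alp cop gA gC probs) hmem g0 hg0
  refine ⟨hsweep.1, hsweep.2.2 hInv0, ?_⟩
  -- the edge inequalities on the final table
  have hE : ∀ i j : Int, pvRect alp cop gA gC i j →
      ∀ ra rb wa wb co : Int, [ra, rb, wa, wb, co] ∈ probs → ra ≤ i → rb ≤ j →
        pvAV gF (min (i + wa) gA) (min (j + wb) gC) ≤ pvAV gF i j + co := by
    intro i j hr ra rb wa wb co hm hra hrb
    obtain ⟨L, R, hsplit, hlex⟩ := pvStreamA_split hr hm
    have hmemL : ∀ x ∈ L, pvRect alp cop gA gC x.1 x.2.1 ∧ x.2.2 ∈ probs := by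
      intro x hx
      exact hmem x (by rw [hsplit]; exact List.mem_append.2 (Or.inl hx))
    have hmemR : ∀ x ∈ R, pvRect alp cop gA gC x.1 x.2.1 ∧ x.2.2 ∈ probs := by
      intro x hx
      exact hmem x (by
        rw [hsplit]
        exact List.mem_append.2 (Or.inr (List.mem_cons_of_mem _ hx)))
    have hfold : gF = R.foldl (fun g x => pvStepA gA gC x.1 x.2.1 g x.2.2)
        (pvStepA gA gC i j
          (L.foldl (fun g x => pvStepA gA gC x.1 x.2.1 g x.2.2) g0) [ra, rb, wa, wb, co])
        := by
      rw [hgF, hsplit, List.foldl_append, List.foldl_cons]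
    set g1 := L.foldl (fun g x => pvStepA gA gC x.1 x.2.1 g x.2.2) g0 with hg1def
    have hg1 : pvGood g1 := (pvSweep_props hc L hmemL g0 hg0).1
    set g2 := pvStepA gA gC i j g1 [ra, rb, wa, wb, co] with hg2def
    have hstepP := pvStepA_props hc hr hm hg1
    have hg2 : pvGood g2 := hstepP.1
    have hrelax : pvAV g2 (min (i + wa) gA) (min (j + wb) gC) ≤ pvAV g1 i j + co :=
      pvStepA_relax hc hr hm hra hrb hg1
    have hsweepR := pvSweep_props hc R hmemR g2 hg2
    obtain ⟨q1, q2, q3, q4, q5, q6, q7, q8, q9, q10, q11, q12⟩ := pvCoordBounds hc hr hm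
    have hmono : pvAV gF (min (i + wa) gA) (min (j + wb) gC) ≤
        pvAV g2 (min (i + wa) gA) (min (j + wb) gC) := by
      rw [hfold]
      exact (hsweepR.2.1 _ _ (by omega) q10 (by omega) q12).1
    have hfreezeR : pvAV gF i j = pvAV g2 i j := by
      rw [hfold]
      exact (hsweepR.2.1 i j q1 q2 q3 q4).2 (fun x hx => hlex x hx)
    have hfreezeS : pvAV g2 i j = pvAV g1 i j :=
      (hstepP.2 i j q1 q2 q3 q4).2 (Or.inr ⟨rfl, le_refl _⟩)
    rw [hfreezeR, hfreezeS]
    omega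
  exact pvChainA hc gF (le_trans ((hsweep.2.1 alp cop halp.1 (by omega) halp.2.2.1 (by omega)).1) hS0) hE

-- ===== VERDICT (by name: the statement is the Claim_ definition above) =====
theorem solution_spec : Claim_equal_solution := by
  intro alp cop problems _ hPre
  unfold Spec_solution solution solution_alt
  simp only [PySem.List.max?_id_cons, Option.getD_some, List.foldl_map,
    PySem.List.foldl_prod_mk (f := fun (a : Int) (p : List Int) => max a (PySem.List.pyGetD p 0 0))
      (g := fun (a : Int) (p : List Int) => max a (PySem.List.pyGetD p 1 0))]
  set gA := problems.foldl (fun (a : Int) (p : List Int) => max a (PySem.List.pyGetD p 0 0)) alp with hgAdef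
  set gC := problems.foldl (fun (a : Int) (p : List Int) => max a (PySem.List.pyGetD p 1 0)) cop with hgCdef
  by_cases hearly : gA ≤ alp ∧ gC ≤ cop
  · rw [if_pos hearly, if_pos hearly]
  · rw [if_neg hearly, if_neg hearly]
    have hM : 0 ≤ alp ∧ alp ≤ 150 ∧ 0 ≤ cop ∧ cop ≤ 150 ∧
        ∀ p ∈ problems, p.length = 5 ∧ (∀ x ∈ p, 0 ≤ x) ∧
          PySem.List.pyGetD p 0 0 ≤ 150 ∧ PySem.List.pyGetD p 1 0 ≤ 150 := by
      rcases hPre with hE | hM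
      · exact absurd ⟨pvFoldlMaxLe problems _ alp alp le_rfl (fun p hp => (hE p hp).2.1),
          pvFoldlMaxLe problems _ cop cop le_rfl (fun p hp => (hE p hp).2.2)⟩ hearly
      · exact hM
    obtain ⟨h0a, h150a, h0c, h150c, hrows⟩ := hM
    have hAlpLe : alp ≤ gA := (PySem.List.le_foldl_max_int problems _ alp).1
    have hCopLe : cop ≤ gC := (PySem.List.le_foldl_max_int problems _ cop).1
    have hgA150 : gA ≤ 150 :=
      pvFoldlMaxLe problems _ 150 alp h150a (fun p hp => (hrows p hp).2.2.1)
    have hgC150 : gC ≤ 150 :=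
      pvFoldlMaxLe problems _ 150 cop h150c (fun p hp => (hrows p hp).2.2.2)
    have hc : pvCtx alp cop gA gC (problems ++ [[0, 0, 1, 0, 1], [0, 0, 0, 1, 1]]) := by
      refine ⟨h0a, hAlpLe, hgA150, h0c, hCopLe, hgC150, ?_⟩
      intro p hp
      rcases List.mem_append.1 hp with hp | hp
      · exact hrows p hp
      · simp only [List.mem_cons, List.not_mem_nil, or_false] at hp
        rcases hp with rfl | rfl <;> exact ⟨rfl, by decide, by decide, by decide⟩
    -- A's nested sweep is the fold over the lex-ordered stream
    have hflat : ∀ init : List (List Int),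
        List.foldl
          (fun g i => List.foldl
            (fun g j => List.foldl (fun g p => pvStepA gA gC i j g p) g
              (problems ++ [[0, 0, 1, 0, 1], [0, 0, 0, 1, 1]]))
            g (PySem.List.pyRange cop (gC + 1) 1))
          init (PySem.List.pyRange alp (gA + 1) 1)
        = (pvStreamA alp cop gA gC (problems ++ [[0, 0, 1, 0, 1], [0, 0, 0, 1, 1]])).foldl
            (fun g x => pvStepA gA gC x.1 x.2.1 g x.2.2) init := by
      intro init
      unfold pvStreamA
      simp only [List.foldl_flatMap, List.foldl_map]
    rw [hflat]
    -- the initial table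
    have hrepg : pvGood (List.replicate 151 (List.replicate 151 (90000 : Int))) :=
      ⟨by simp, fun r hr => by rw [List.eq_of_mem_replicate hr]; simp⟩
    have hbase : ∀ I J : Int, 0 ≤ I → I ≤ 150 → 0 ≤ J → J ≤ 150 →
        pvAV (List.replicate 151 (List.replicate 151 (90000 : Int))) I J = 90000 := by
      intro I J hI1 hI2 hJ1 hJ2
      unfold pvAV pvGetN
      have h1 : pvN I < (List.replicate 151 (List.replicate 151 (90000:Int))).length := by
        rw [List.length_replicate]; exact pvN_lt I (by omega) hI2
      rw [List.getD_eq_getElem _ [] h1, List.getElem_replicate]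
      have h2 : pvN J < (List.replicate 151 (90000:Int)).length := by
        rw [List.length_replicate]; exact pvN_lt J (by omega) hJ2
      rw [List.getD_eq_getElem _ 0 h2, List.getElem_replicate]
    have hset2 : pvSet2 (List.replicate 151 (List.replicate 151 90000)) alp cop 0 =
        pvSetN (List.replicate 151 (List.replicate 151 90000)) (pvN alp) (pvN cop) 0 :=
      pvSet2_norm _ alp cop 0 hrepg (by omega) h150a (by omega) h150c
    have hAV0 : ∀ I J : Int, 0 ≤ I → I ≤ 150 → 0 ≤ J → J ≤ 150 →
        pvAV (pvSet2 (List.replicate 151 (List.replicate 151 90000)) alp cop 0) I J =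
          if I = alp ∧ J = cop then 0 else 90000 := by
      intro I J hI1 hI2 hJ1 hJ2
      rw [hset2, pvAV_setN _ _ _ _ _ _ hrepg h0a h150a h0c h150c hI1 hI2 hJ1 hJ2]
      split
      · rfl
      · exact hbase I J hI1 hI2 hJ1 hJ2
    have hgood0 : pvGood (pvSet2 (List.replicate 151 (List.replicate 151 90000)) alp cop 0) := by
      rw [hset2]
      exact pvSetN_good _ _ _ _ hrepg (pvN_lt alp (by omega) h150a)
    have hInv0 : pvInvA alp cop gA gC (problems ++ [[0, 0, 1, 0, 1], [0, 0, 0, 1, 1]])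
        (pvSet2 (List.replicate 151 (List.replicate 151 90000)) alp cop 0) := by
      constructor
      · intro I J hI1 hI2 hJ1 hJ2
        rw [hAV0 I J hI1 hI2 hJ1 hJ2]
        split <;> omega
      · intro I J hIJr
        obtain ⟨z1, z2, z3, z4⟩ := hIJr
        rw [hAV0 I J (by omega) (by omega) (by omega) (by omega)]
        split
        · rename_i hz
          right
          rw [hz.1, hz.2]
          exact pvReach.base
        · left
          rfl
    have hS0 : pvAV (pvSet2 (List.replicate 151 (List.replicate 151 90000)) alp cop 0) alp cop ≤ 0 := by
      rw [hAV0 alp cop h0a h150a h0c h150c, if_pos ⟨rfl, rfl⟩]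
    have hA := pvA_facts hc _ hgood0 hInv0 hS0
    -- B's initial grid, frontier, and invariants
    have hrepB : pvGoodB gA gC
        (List.replicate (gA + 1).toNat (List.replicate (gC + 1).toNat (90000 : Int))) :=
      ⟨by simp, fun r hr => by rw [List.eq_of_mem_replicate hr]; simp⟩
    have hbaseB : ∀ i j : Int,
        pvBV (List.replicate (gA + 1).toNat (List.replicate (gC + 1).toNat (90000 : Int))) i j
          = if i.toNat < (gA + 1).toNat ∧ j.toNat < (gC + 1).toNat then 90000 else 0 := by
      intro i j
      unfold pvBV pvGetN
      by_cases h1 : i.toNat < (gA + 1).toNat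
      · have hlen1 : i.toNat <
            (List.replicate (gA + 1).toNat (List.replicate (gC + 1).toNat (90000 : Int))).length := by
          rw [List.length_replicate]; exact h1
        rw [List.getD_eq_getElem _ [] hlen1, List.getElem_replicate]
        by_cases h2 : j.toNat < (gC + 1).toNat
        · have hlen2 : j.toNat < (List.replicate (gC + 1).toNat (90000 : Int)).length := by
            rw [List.length_replicate]; exact h2
          rw [List.getD_eq_getElem _ 0 hlen2, List.getElem_replicate, if_pos ⟨h1, h2⟩]
        · have hlen2 : (List.replicate (gC + 1).toNat (90000 : Int)).length ≤ j.toNat := by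
            rw [List.length_replicate]; omega
          rw [List.getD_eq_default _ _ hlen2, if_neg (by tauto)]
      · have hlen1 :
            (List.replicate (gA + 1).toNat (List.replicate (gC + 1).toNat (90000 : Int))).length ≤ i.toNat := by
          rw [List.length_replicate]; omega
        rw [List.getD_eq_default _ _ hlen1]
        simp only [List.getD_nil]
        rw [if_neg (by tauto)]
    have hset2B : pvSet2
        (List.replicate (gA + 1).toNat (List.replicate (gC + 1).toNat 90000)) alp cop 0 =
        pvSetN (List.replicate (gA + 1).toNat (List.replicate (gC + 1).toNat 90000))
          alp.toNat cop.toNat 0 :=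
      pvSet2_nonneg _ alp cop 0 (by omega) (by omega)
    have hBV0 : ∀ i j : Int, 0 ≤ i → 0 ≤ j →
        pvBV (pvSet2 (List.replicate (gA + 1).toNat (List.replicate (gC + 1).toNat 90000))
          alp cop 0) i j =
          if i = alp ∧ j = cop then 0
          else if i.toNat < (gA + 1).toNat ∧ j.toNat < (gC + 1).toNat then 90000 else 0 := by
      intro i j hi hj
      rw [hset2B, pvBV_setN _ alp cop i j 0 hrepB h0a hAlpLe h0c hCopLe hi hj]
      split
      · rfl
      · exact hbaseB i j
    have hgood0B : pvGoodB gA gC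
        (pvSet2 (List.replicate (gA + 1).toNat (List.replicate (gC + 1).toNat 90000)) alp cop 0) := by
      rw [hset2B]
      exact pvSetN_len_rows_g _ _ _ _ _ _ hrepB.1 hrepB.2 (by simp; omega)
    have hInv0B : pvInvG alp cop gA gC (problems ++ [[0, 0, 1, 0, 1], [0, 0, 0, 1, 1]])
        (pvSet2 (List.replicate (gA + 1).toNat (List.replicate (gC + 1).toNat 90000)) alp cop 0) := by
      refine ⟨hgood0B, ?_, ?_, ?_⟩
      · intro i j hi hj
        rw [hBV0 i j hi hj]
        split
        · omega
        · split <;> omega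
      · intro i j hrect
        obtain ⟨z1, z2, z3, z4⟩ := hrect
        rw [hBV0 i j (by omega) (by omega)]
        split
        · rename_i hz
          right
          rw [hz.1, hz.2]
          exact ⟨by omega, pvReach.base⟩
        · rw [if_pos ⟨by omega, by omega⟩]
          left
          rfl
      · rw [hBV0 alp cop h0a h0c, if_pos ⟨rfl, rfl⟩]
    have hok0 : pvFrOkG alp cop gA gC
        (pvSet2 (List.replicate (gA + 1).toNat (List.replicate (gC + 1).toNat 90000)) alp cop 0)
        [((alp, cop) : Int × Int)] := by
      intro u hu
      simp only [List.mem_singleton] at hu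
      subst hu
      refine ⟨⟨le_refl _, hAlpLe, le_refl _, hCopLe⟩, ?_⟩
      rw [hBV0 alp cop h0a h0c, if_pos ⟨rfl, rfl⟩]
      omega
    have hset0 : pvSettledAllG alp cop gA gC (problems ++ [[0, 0, 1, 0, 1], [0, 0, 0, 1, 1]])
        (pvSet2 (List.replicate (gA + 1).toNat (List.replicate (gC + 1).toNat 90000)) alp cop 0)
        [((alp, cop) : Int × Int)] := by
      intro i j hrect hnm ra rb wa wb co hm hra hrb
      obtain ⟨z1, z2, z3, z4⟩ := hrect
      have hne : ¬ (i = alp ∧ j = cop) := by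
        intro h
        exact hnm (by rw [h.1, h.2]; exact List.mem_singleton.2 rfl)
      have hco := (pvRowBounds hc hm).2.2.2.2.2.2
      have hd : pvBV (pvSet2 (List.replicate (gA + 1).toNat
          (List.replicate (gC + 1).toNat 90000)) alp cop 0) i j = 90000 := by
        rw [hBV0 i j (by omega) (by omega), if_neg hne, if_pos ⟨by omega, by omega⟩]
      have hle := hInv0B.2.1 (min (i + wa) gA) (min (j + wb) gC)
        (by have := (pvRowBounds hc hm).2.2.2.2.1; omega)
        (by have := (pvRowBounds hc hm).2.2.2.2.2.1; omega)
      rw [hd]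
      omega
    have hcov0 : pvCoverG alp cop gA gC (problems ++ [[0, 0, 1, 0, 1], [0, 0, 0, 1, 1]])
        (pvSet2 (List.replicate (gA + 1).toNat (List.replicate (gC + 1).toNat 90000)) alp cop 0)
        0 := by
      intro n i j c h hn
      cases h with
      | base =>
        rw [hBV0 alp cop h0a h0c, if_pos ⟨rfl, rfl⟩]
        omega
      | step hr hm hra hrb => omega
    have hB := pvRounds_props hc (gA - alp + (gC - cop)).toNat
      (pvSet2 (List.replicate (gA + 1).toNat (List.replicate (gC + 1).toNat 90000)) alp cop 0)
      [((alp, cop) : Int × Int)] 0 hInv0B hok0 hset0 hcov0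
    -- final values
    rw [pvGet2_norm _ gA gC hA.1 (by omega) hgA150 (by omega) hgC150,
        pvGet2_nonneg _ gA gC (by omega) (by omega)]
    have hrect_goal : pvRect alp cop gA gC gA gC := ⟨hAlpLe, le_refl _, hCopLe, le_refl _⟩
    apply le_antisymm
    · -- A ≤ B
      rcases hB.1.2.2.1 gA gC hrect_goal with hB90 | hBr
      · rw [hB90]
        exact hA.2.1.1 gA gC (by omega) hgA150 (by omega) hgC150
      · exact hA.2.2 gA gC _ hBr.2
    · -- B ≤ A
      rcases hA.2.1.2 gA gC hrect_goal with hA90 | hAr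
      · rw [hA90]
        exact hB.1.2.1 gA gC (by omega) (by omega)
      · obtain ⟨n, c', hN, hc', hn⟩ := pvReach_toN hc hAr
        have hcovF := hB.2 n gA gC c' hN (by omega)
        omega
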